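-- pv_equiv track=rewrite | github.com/sakha-sakhar/krestiki-noliki | крестики нолики.py | get_diag2
-- ===== SOURCE A (Python) =====
-- SIZE = 25
--
-- def get_diag2(board, coords):
--     diag = coords[0] - coords[1]
--     res = [[], [], []]
--     n = 0
--     for i in range(SIZE):
--         for j in range(SIZE):
--             if (i, j) == tuple(coords):
--                 res[1].append(board[i][j])
--                 n = 2
--             elif i - j == diag:
--                 res[n].append(board[i][j])
--     return res
-- ===== SOURCE B (Python) =====
-- SIZE = 25
--
-- def get_diag2(board, coords):
--     diag = coords[0] - coords[1]
--     lo = max(0, diag)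
--     hi = min(SIZE - 1, SIZE - 1 + diag)
--     before, mid, after = [], [], []
--     seen = False
--     for i in range(lo, hi + 1):
--         j = i - diag
--         v = board[i][j]
--         if list(coords) == [i, j]:
--             mid.append(v)
--             seen = True
--         elif seen:
--             after.append(v)
--         else:
--             before.append(v)
--     return [before, mid, after]
-- ===== Notes on version B (the rewrite author's own statement) =====
-- stated objective: faster
-- what changed: B visits only the at-most-25 cells on the diagonal directly (j = i - diag for i in the valid range), keeping a seen-flag to split before/at/after the coord cell, instead of A's full 25x25 scan testing every cell.
import Mathlib
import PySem

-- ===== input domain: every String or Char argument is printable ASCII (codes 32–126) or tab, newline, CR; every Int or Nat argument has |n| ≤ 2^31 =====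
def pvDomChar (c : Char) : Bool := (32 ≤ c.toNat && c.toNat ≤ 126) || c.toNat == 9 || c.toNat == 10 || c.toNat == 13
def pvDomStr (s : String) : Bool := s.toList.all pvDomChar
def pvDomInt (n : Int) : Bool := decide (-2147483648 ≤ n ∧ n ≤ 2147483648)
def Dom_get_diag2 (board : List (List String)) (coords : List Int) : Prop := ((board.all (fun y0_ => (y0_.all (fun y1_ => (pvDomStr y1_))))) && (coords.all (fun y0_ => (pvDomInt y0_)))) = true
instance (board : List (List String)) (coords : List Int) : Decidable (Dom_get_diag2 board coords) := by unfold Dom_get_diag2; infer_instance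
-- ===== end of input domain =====

-- B replaces A's full 25x25 scan with a direct walk over the at-most-25 diagonal cells
-- (j = i - diag), splitting before/at/after the coord cell with a seen-flag.

-- ===== PORT A =====
-- one step of A's inner loop body (the j-iteration), branches in A's order
def aStep (board : List (List String)) (coords : List Int) (diag : Int)
    (st : List (List String) × Int) (i j : Int) : List (List String) × Int :=
  if coords = [i, j] then
    (PySem.List.pySetD st.1 1
      (PySem.List.pyGetD st.1 1 [] ++ [PySem.List.pyGetD (PySem.List.pyGetD board i []) j ""]), 2)
  else if i - j = diag then
    (PySem.List.pySetD st.1 st.2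
      (PySem.List.pyGetD st.1 st.2 [] ++ [PySem.List.pyGetD (PySem.List.pyGetD board i []) j ""]), st.2)
  else st

-- A's double loop over the full 25×25 board, state = (res, n)
def aLoop (board : List (List String)) (coords : List Int) (diag : Int) :
    List (List String) × Int :=
  (PySem.List.pyRange 0 25 1).foldl
    (fun st i => (PySem.List.pyRange 0 25 1).foldl
      (fun st j => aStep board coords diag st i j) st)
    ([[], [], []], 0)

def get_diag2 (board : List (List String)) (coords : List Int) : List (List String) :=
  (aLoop board coords (PySem.List.pyGetD coords 0 0 - PySem.List.pyGetD coords 1 0)).1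

-- ===== PORT B =====
-- one step of B's loop, state = (before, mid, after, seen)
def bStep (board : List (List String)) (coords : List Int) (diag : Int)
    (st : List String × List String × List String × Bool) (i : Int) :
    List String × List String × List String × Bool :=
  let j := i - diag
  let v := PySem.List.pyGetD (PySem.List.pyGetD board i []) j ""
  if coords = [i, j] then (st.1, st.2.1 ++ [v], st.2.2.1, true)
  else if st.2.2.2 then (st.1, st.2.1, st.2.2.1 ++ [v], st.2.2.2)
  else (st.1 ++ [v], st.2.1, st.2.2.1, st.2.2.2)

-- B's single loop over the diagonal cells, i from max(0,diag) to min(24, 24+diag)  (24 = SIZE-1)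
def bLoop (board : List (List String)) (coords : List Int) (diag : Int) :
    List String × List String × List String × Bool :=
  (PySem.List.pyRange (max 0 diag) (min 24 (24 + diag) + 1) 1).foldl
    (bStep board coords diag) ([], [], [], false)

def get_diag2_alt (board : List (List String)) (coords : List Int) : List (List String) :=
  let st := bLoop board coords (PySem.List.pyGetD coords 0 0 - PySem.List.pyGetD coords 1 0)
  [st.1, st.2.1, st.2.2.1]

-- ===== PRECONDITION & SPEC =====
-- A raises IndexError iff coords has fewer than 2 elements, or some diagonal cell
-- (i, i-diag) with 0 ≤ i < 25 and 0 ≤ i-diag < 25 lies outside board; Pre_ excludes exactly those.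
def Pre_get_diag2 (board : List (List String)) (coords : List Int) : Prop :=
  2 ≤ coords.length ∧
  ∀ i ∈ List.range 25,
    (0 ≤ (i : Int) - (coords.getD 0 0 - coords.getD 1 0) ∧
     (i : Int) - (coords.getD 0 0 - coords.getD 1 0) < 25) →
    (i < board.length ∧
     ((i : Int) - (coords.getD 0 0 - coords.getD 1 0)).toNat < (board.getD i []).length)
instance (board : List (List String)) (coords : List Int) : Decidable (Pre_get_diag2 board coords) := by unfold Pre_get_diag2; infer_instance

def pvWitness_get_diag2 : List (List String) × List Int :=
  ([["X", "O"], ["O", "X"]], [0, 27])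

def Spec_get_diag2 (board : List (List String)) (coords : List Int) (out : List (List String)) : Prop := out = get_diag2_alt board coords
instance (board : List (List String)) (coords : List Int) (out : List (List String)) : Decidable (Spec_get_diag2 board coords out) := by unfold Spec_get_diag2; infer_instance

-- ===== CLAIM (what is proved, stated in full; the proofs are below) =====
def Claim_equal_get_diag2 : Prop := ∀ (board : List (List String)) (coords : List Int), Dom_get_diag2 board coords → Pre_get_diag2 board coords → Spec_get_diag2 board coords (get_diag2 board coords)

-- ===== LEMMAS AND PROOFS =====

theorem diag_of_coords_eq (coords : List Int) (i j : Int) (h : coords = [i, j]) :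
    PySem.List.pyGetD coords 0 0 - PySem.List.pyGetD coords 1 0 = i - j := by
  subst h; simp [pysem]

theorem aStep_eq_of_ne (board : List (List String)) (coords : List Int) (dg : Int)
    (hdg : dg = PySem.List.pyGetD coords 0 0 - PySem.List.pyGetD coords 1 0)
    (st : List (List String) × Int) (i j : Int) (hja : j ≠ i - dg) :
    aStep board coords dg st i j = st := by
  unfold aStep
  rw [if_neg, if_neg]
  · intro hc; omega
  · intro hc
    have h2 := diag_of_coords_eq coords i j hc
    rw [← hdg] at h2; omega

-- A's inner loop acts at most at j = i - diag; on any j-range it collapses to one step (or none).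
theorem inner_fold_aux (board : List (List String)) (coords : List Int) (i dg : Int)
    (hdg : dg = PySem.List.pyGetD coords 0 0 - PySem.List.pyGetD coords 1 0) :
    ∀ (n : Nat) (a b : Int), (b - a).toNat = n → ∀ (st : List (List String) × Int),
    (PySem.List.pyRange a b 1).foldl (fun st j => aStep board coords dg st i j) st
      = if a ≤ i - dg ∧ i - dg < b then aStep board coords dg st i (i - dg) else st := by
  intro n
  induction n with
  | zero =>
    intro a b h st
    rw [PySem.List.pyRange_one_eq_nil (by omega), List.foldl_nil, if_neg (by omega)]
  | succ n ih =>
    intro a b h st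
    rw [PySem.List.pyRange_one_cons (by omega), List.foldl_cons]
    rw [ih (a + 1) b (by omega)]
    by_cases hja : a = i - dg
    · rw [if_neg (by omega), if_pos (by omega), hja]
    · rw [aStep_eq_of_ne board coords dg hdg st i a (by omega)]
      by_cases hc : a + 1 ≤ i - dg ∧ i - dg < b
      · rw [if_pos hc, if_pos (by omega)]
      · rw [if_neg hc, if_neg (by omega)]

-- fold of a function that fixes the state is the identity
theorem foldl_id_of_fixed (g : (List (List String) × Int) → Int → (List (List String) × Int))
    (l : List Int) (hg : ∀ st, ∀ i ∈ l, g st i = st) :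
    ∀ st, l.foldl g st = st := by
  induction l with
  | nil => intro st; rfl
  | cons x xs ih =>
    intro st
    simp only [List.foldl_cons, hg st x (by simp)]
    exact ih (fun st i hi => hg st i (by simp [hi])) st

-- correspondence between A's collapsed per-row step and B's step, over any i-range
theorem mid_fold_aux (board : List (List String)) (coords : List Int) (dg : Int) :
    ∀ (n : Nat) (a b : Int), (b - a).toNat = n →
    ∀ (r0 r1 r2 : List String) (sn : Bool),
    (PySem.List.pyRange a b 1).foldl
        (fun st i => aStep board coords dg st i (i - dg)) ([r0, r1, r2], if sn then 2 else 0)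
      = (fun t => ([t.1, t.2.1, t.2.2.1], if t.2.2.2 then (2 : Int) else 0))
          ((PySem.List.pyRange a b 1).foldl (bStep board coords dg) (r0, r1, r2, sn)) := by
  intro n
  induction n with
  | zero =>
    intro a b h r0 r1 r2 sn
    rw [PySem.List.pyRange_one_eq_nil (by omega)]
    rfl
  | succ n ih =>
    intro a b h r0 r1 r2 sn
    rw [PySem.List.pyRange_one_cons (by omega), List.foldl_cons, List.foldl_cons]
    by_cases hc : coords = [a, a - dg]
    · have hA : aStep board coords dg ([r0, r1, r2], if sn then 2 else 0) a (a - dg)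
          = ([r0, r1 ++ [PySem.List.pyGetD (PySem.List.pyGetD board a []) (a - dg) ""], r2], 2) := by
        unfold aStep
        rw [if_pos hc]
        simp [PySem.List.pySetD, PySem.List.pySet?, PySem.List.pyIdx?, PySem.List.pyGetD, PySem.List.pyGet?]
      have hB : bStep board coords dg (r0, r1, r2, sn) a
          = (r0, r1 ++ [PySem.List.pyGetD (PySem.List.pyGetD board a []) (a - dg) ""], r2, true) := by
        unfold bStep
        rw [if_pos hc]
      rw [hA, hB]
      have := ih (a + 1) b (by omega) r0
        (r1 ++ [PySem.List.pyGetD (PySem.List.pyGetD board a []) (a - dg) ""]) r2 true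
      simpa using this
    · have hA : aStep board coords dg ([r0, r1, r2], if sn then 2 else 0) a (a - dg)
          = (if sn then ([r0, r1, r2 ++ [PySem.List.pyGetD (PySem.List.pyGetD board a []) (a - dg) ""]], if sn then (2:Int) else 0)
             else ([r0 ++ [PySem.List.pyGetD (PySem.List.pyGetD board a []) (a - dg) ""], r1, r2], if sn then (2:Int) else 0)) := by
        unfold aStep
        rw [if_neg hc, if_pos (by omega)]
        cases sn <;>
          simp [PySem.List.pySetD, PySem.List.pySet?, PySem.List.pyIdx?, PySem.List.pyGetD, PySem.List.pyGet?]
      have hB : bStep board coords dg (r0, r1, r2, sn) a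
          = (if sn then (r0, r1, r2 ++ [PySem.List.pyGetD (PySem.List.pyGetD board a []) (a - dg) ""], sn)
             else (r0 ++ [PySem.List.pyGetD (PySem.List.pyGetD board a []) (a - dg) ""], r1, r2, sn)) := by
        unfold bStep
        rw [if_neg hc]
      rw [hA, hB]
      cases sn
      · simpa using ih (a + 1) b (by omega)
          (r0 ++ [PySem.List.pyGetD (PySem.List.pyGetD board a []) (a - dg) ""]) r1 r2 false
      · simpa using ih (a + 1) b (by omega)
          r0 r1 (r2 ++ [PySem.List.pyGetD (PySem.List.pyGetD board a []) (a - dg) ""]) true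

-- the two loops agree for the diag value the ports compute
theorem loops_eq (board : List (List String)) (coords : List Int) (dg : Int)
    (hdg : dg = PySem.List.pyGetD coords 0 0 - PySem.List.pyGetD coords 1 0) :
    (aLoop board coords dg).1
      = [(bLoop board coords dg).1, (bLoop board coords dg).2.1, (bLoop board coords dg).2.2.1] := by
  unfold aLoop bLoop
  have hfun : (fun (st : List (List String) × Int) (i : Int) =>
        (PySem.List.pyRange 0 25 1).foldl (fun st j => aStep board coords dg st i j) st)
      = (fun st i => if 0 ≤ i - dg ∧ i - dg < 25
          then aStep board coords dg st i (i - dg) else st) := by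
    funext st i
    exact inner_fold_aux board coords i dg hdg ((25 : Int) - 0).toNat 0 25 rfl st
  rw [hfun]
  by_cases hbig : dg < -24 ∨ 24 < dg
  · rw [foldl_id_of_fixed _ _ (fun st i hi => by
      rw [if_neg]
      rw [PySem.List.mem_pyRange_one] at hi
      omega)]
    rw [PySem.List.pyRange_one_eq_nil (by omega)]
    rfl
  · have h1 : PySem.List.pyRange 0 25 1
        = PySem.List.pyRange 0 (max 0 dg) 1 ++ PySem.List.pyRange (max 0 dg) 25 1 :=
      PySem.List.pyRange_one_append 0 (max 0 dg) 25 (by omega) (by omega)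
    have h2 : PySem.List.pyRange (max 0 dg) 25 1
        = PySem.List.pyRange (max 0 dg) (min 24 (24 + dg) + 1) 1
          ++ PySem.List.pyRange (min 24 (24 + dg) + 1) 25 1 :=
      PySem.List.pyRange_one_append (max 0 dg) (min 24 (24 + dg) + 1) 25 (by omega) (by omega)
    rw [h1, List.foldl_append, h2, List.foldl_append]
    rw [foldl_id_of_fixed _ (PySem.List.pyRange 0 (max 0 dg) 1) (fun st i hi => by
      rw [if_neg]
      rw [PySem.List.mem_pyRange_one] at hi
      omega)]
    have hmid : ∀ (st : List (List String) × Int),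
        ∀ i ∈ PySem.List.pyRange (max 0 dg) (min 24 (24 + dg) + 1) 1,
        (if 0 ≤ i - dg ∧ i - dg < 25 then aStep board coords dg st i (i - dg) else st)
          = aStep board coords dg st i (i - dg) := by
      intro st i hi
      rw [PySem.List.mem_pyRange_one] at hi
      rw [if_pos (by omega)]
    rw [PySem.List.foldl_congr_mem _ _ _ _ (fun st i hi => hmid st i hi)]
    have := mid_fold_aux board coords dg
      (((min 24 (24 + dg) + 1) : Int) - max 0 dg).toNat (max 0 dg) (min 24 (24 + dg) + 1) rfl
      [] [] [] false
    simp only [show (if false then (2:Int) else 0) = 0 from rfl] at this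
    rw [this]
    rw [foldl_id_of_fixed _ (PySem.List.pyRange (min 24 (24 + dg) + 1) 25 1) (fun st i hi => by
      rw [if_neg]
      rw [PySem.List.mem_pyRange_one] at hi
      omega)]

-- ===== VERDICT (by name: the statement is the Claim_ definition above) =====
theorem get_diag2_spec : Claim_equal_get_diag2 := by
  intro board coords _ _
  show get_diag2 board coords = get_diag2_alt board coords
  unfold get_diag2 get_diag2_alt
  exact loops_eq board coords _ rfl
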